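-- pv_equiv track=rewrite | github.com/whitepaper2/algoDiary | leetcode/weekly-contest/double-week62.py | waysToPartition
-- ===== SOURCE A (Python) =====
-- from typing import List
--
-- def waysToPartition(nums: List[int], k: int) -> int:
--     """
--     暴力解法，时间复杂度：O(n*n)
--     :param nums:
--     :param k:
--     :return:
--     """
--     n = len(nums)
--     prefixSum = [0] * (n + 1)
--     res = 0
--     for i in range(1, n + 1):
--         prefixSum[i] = prefixSum[i - 1] + nums[i - 1]
--     for i in range(1, n):
--         if 2 * prefixSum[i] == prefixSum[n]:
--             res += 1
--     for i in range(n):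
--         cur = 0
--         tmpSum = prefixSum[:i + 1]
--
--         j = i + 1
--         while j < n + 1:
--             tmpSum.append(prefixSum[j] + k - nums[i])
--             j += 1
--         for p in range(1, n):
--             if 2 * tmpSum[p] == tmpSum[-1]:
--                 cur += 1
--         res = max(res, cur)
--     return res
-- ===== SOURCE B (Python) =====
-- def waysToPartition(nums, k):
--     # O(n): prefix sums + two difference-count maps, single sweep (A is O(n^2))
--     n = len(nums)
--     pref = []
--     s = 0
--     for x in nums:
--         s += x
--         pref.append(s)
--     total = s
--     left = {}
--     right = {}
--     for p in range(1, n):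
--         key = 2 * pref[p - 1]
--         right[key] = right.get(key, 0) + 1
--     res = right.get(total, 0)
--     for i in range(n):
--         if i >= 1:
--             key = 2 * pref[i - 1]
--             right[key] -= 1
--             left[key] = left.get(key, 0) + 1
--         d = k - nums[i]
--         cand = left.get(total + d, 0) + right.get(total - d, 0)
--         if cand > res:
--             res = cand
--     return res
-- ===== Notes on version B (the rewrite author's own statement) =====
-- stated objective: faster
-- what changed: Replaced A's O(n^2) rebuild-and-rescan of the prefix-sum array for every changed index with prefix sums plus two difference-count hash maps (left/right pivot counts) updated in a single O(n) sweep.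
import Mathlib
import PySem

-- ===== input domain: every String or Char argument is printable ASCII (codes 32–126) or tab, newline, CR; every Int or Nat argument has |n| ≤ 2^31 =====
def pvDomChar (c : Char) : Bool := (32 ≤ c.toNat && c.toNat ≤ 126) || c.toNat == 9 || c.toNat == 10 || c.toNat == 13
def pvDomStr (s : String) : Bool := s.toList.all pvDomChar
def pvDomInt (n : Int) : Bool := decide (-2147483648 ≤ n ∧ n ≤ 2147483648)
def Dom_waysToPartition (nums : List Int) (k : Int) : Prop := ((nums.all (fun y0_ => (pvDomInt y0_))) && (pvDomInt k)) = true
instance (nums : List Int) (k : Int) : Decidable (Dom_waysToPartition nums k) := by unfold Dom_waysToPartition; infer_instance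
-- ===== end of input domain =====

-- B replaces A's quadratic per-index rescan by prefix sums and two difference-count dictionaries in a single sweep.


-- ===== PORT A =====
def waysToPartition (nums : List Int) (k : Int) : Int :=
  let n := nums.length
  let prefixSum0 : List Int := List.replicate (n + 1) 0
  let prefixSum := (PySem.List.pyRange 1 ((n : Int) + 1) 1).foldl
      (fun ps i => ps.set i.toNat (PySem.List.pyGetD ps (i - 1) 0 + PySem.List.pyGetD nums (i - 1) 0)) prefixSum0
  let res : Int := (PySem.List.pyRange 1 (n : Int) 1).foldl
      (fun r i => if 2 * PySem.List.pyGetD prefixSum i 0 = PySem.List.pyGetD prefixSum (n : Int) 0 then r + 1 else r) 0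
  (PySem.List.pyRange 0 (n : Int) 1).foldl
    (fun r i =>
      let tmpSum0 := PySem.List.slice prefixSum none (some (i + 1))
      let tmpSum := (PySem.List.pyRange (i + 1) ((n : Int) + 1) 1).foldl
          (fun t j => t ++ [PySem.List.pyGetD prefixSum j 0 + k - PySem.List.pyGetD nums i 0]) tmpSum0
      let cur := (PySem.List.pyRange 1 (n : Int) 1).foldl
          (fun c p => if 2 * PySem.List.pyGetD tmpSum p 0 = PySem.List.pyGetD tmpSum (-1) 0 then c + 1 else c) 0
      max r cur) res

-- ===== PORT B =====
def waysToPartition_alt (nums : List Int) (k : Int) : Int :=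
  let n := nums.length
  let ps := nums.foldl (fun (st : List Int × Int) x => (st.1 ++ [st.2 + x], st.2 + x)) ([], 0)
  let pref := ps.1
  let total := ps.2
  let right0 : PySem.Dict Int Int := (PySem.List.pyRange 1 (n : Int) 1).foldl
      (fun d p =>
        let key := 2 * PySem.List.pyGetD pref (p - 1) 0
        d.insert key (d.getD key 0 + 1)) PySem.Dict.empty
  let res0 := right0.getD total 0
  let st := (PySem.List.pyRange 0 (n : Int) 1).foldl
      (fun (st : PySem.Dict Int Int × PySem.Dict Int Int × Int) i =>
        let lr :=
          if 1 ≤ i then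
            let key := 2 * PySem.List.pyGetD pref (i - 1) 0
            (st.1.insert key (st.1.getD key 0 + 1), st.2.1.insert key (st.2.1.getD key 0 - 1))
          else (st.1, st.2.1)
        let d := k - PySem.List.pyGetD nums i 0
        let cand := lr.1.getD (total + d) 0 + lr.2.getD (total - d) 0
        (lr.1, lr.2, if cand > st.2.2 then cand else st.2.2))
      (PySem.Dict.empty, right0, res0)
  st.2.2

-- ===== PRECONDITION & SPEC =====
def Spec_waysToPartition (nums : List Int) (k : Int) (out : Int) : Prop := out = waysToPartition_alt nums k
instance (nums : List Int) (k : Int) (out : Int) : Decidable (Spec_waysToPartition nums k out) := by unfold Spec_waysToPartition; infer_instance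

-- ===== CLAIM (what is proved, stated in full; the proofs are below) =====
def Claim_equal_waysToPartition : Prop := ∀ (nums : List Int) (k : Int), Dom_waysToPartition nums k → Spec_waysToPartition nums k (waysToPartition nums k)

-- ===== LEMMAS AND PROOFS =====

def pvPre (nums : List Int) (j : Nat) : Int := (nums.take j).sum
def pvCnt (nums : List Int) (lo len : Nat) (v : Int) : Int :=
  ((List.range' lo len).countP (fun p => 2 * pvPre nums p = v) : Nat)
def pvCand (nums : List Int) (k : Int) (i : Nat) : Int :=
  pvCnt nums 1 i (nums.sum + (k - nums.getD i 0)) +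
    pvCnt nums (i + 1) (nums.length - 1 - i) (nums.sum - (k - nums.getD i 0))
def pvSpec (nums : List Int) (k : Int) : Int :=
  (List.range nums.length).foldl (fun r i => max r (pvCand nums k i))
    (pvCnt nums 1 (nums.length - 1) nums.sum)

lemma pvPre_length (nums : List Int) : pvPre nums nums.length = nums.sum := by
  simp [pvPre]

lemma pvPre_succ (nums : List Int) (m : Nat) (h : m < nums.length) :
    pvPre nums (m + 1) = pvPre nums m + nums.getD m 0 := by
  rw [pvPre, pvPre, List.take_add_one, List.sum_append]
  simp [List.getD, List.getElem?_eq_getElem h]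

lemma pyRangeNat (a b : Nat) :
    PySem.List.pyRange (a : Int) (b : Int) = (List.range' a (b - a)).map (Nat.cast : Nat → Int) := by
  by_cases hba : b ≤ a
  · have : (b : Int) ≤ a := by exact_mod_cast hba
    simp [PySem.List.pyRange, Nat.sub_eq_zero_of_le hba]
  · have h : a < b := Nat.lt_of_not_le hba
    rw [PySem.List.pyRange_of_pos a b one_pos]
    have hab : (a : Int) < b := by exact_mod_cast h
    simp only [if_pos hab]
    have : ((b : Int) - a + 1 - 1) / 1 = ((b - a : Nat) : Int) := by push_cast; omega
    rw [this, Int.toNat_natCast]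
    refine List.ext_getElem (by simp) ?_
    intro i h1 h2
    simp [List.range'_eq_map_range]

lemma pvCnt_zero (nums : List Int) (lo : Nat) (v : Int) : pvCnt nums lo 0 v = 0 := rfl

lemma pvCnt_concat (nums : List Int) (lo t : Nat) (v : Int) :
    pvCnt nums lo (t + 1) v = pvCnt nums lo t v + (if 2 * pvPre nums (lo + t) = v then 1 else 0) := by
  simp only [pvCnt, List.range'_concat, List.countP_append, List.countP_singleton, Nat.one_mul]
  by_cases h : 2 * pvPre nums (lo + t) = v <;> simp [h]

lemma pvCnt_cons (nums : List Int) (lo t : Nat) (v : Int) :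
    pvCnt nums lo (t + 1) v = (if 2 * pvPre nums lo = v then 1 else 0) + pvCnt nums (lo + 1) t v := by
  have hr : List.range' lo (t + 1) = lo :: List.range' (lo + 1) t := by
    simp [List.range'_succ]
  rw [pvCnt, hr, List.countP_cons]
  by_cases h : 2 * pvPre nums lo = v <;> simp [h, pvCnt] <;> omega

lemma pvGetD_neg_one (xs : List Int) (d : Int) (h : xs ≠ []) :
    PySem.List.pyGetD xs (-1) d = xs.getD (xs.length - 1) d := by
  have h1 : 1 ≤ xs.length := List.length_pos_of_ne_nil h
  simp [PySem.List.pyGetD, PySem.List.pyGet?, PySem.List.pyIdx?, h1, List.getD]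

lemma pvFoldCount (P : Nat → Prop) [DecidablePred P] (l : List Nat) (a : Int) :
    List.foldl (fun acc x => if P x then acc + 1 else acc) a l
      = a + ((l.countP (fun x => decide (P x)) : Nat) : Int) := by
  have := PySem.List.foldl_count_if (fun x => decide (P x)) l a
  simpa using this

-- A's prefix-sum array after the first loop
def pvPA (nums : List Int) : List Int := (List.range (nums.length + 1)).map (pvPre nums)

lemma pvPA_get (nums : List Int) (j : Nat) (hj : j < nums.length + 1) :
    PySem.List.pyGetD (pvPA nums) (j : Int) 0 = pvPre nums j := by
  rw [PySem.List.pyGetD_natCast, pvPA, PySem.List.getD_map_range _ _ _ _ hj]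

lemma A_prefix_fold (nums : List Int) (m : Nat) (hm : m ≤ nums.length) :
    (PySem.List.pyRange 1 ((m : Int) + 1)).foldl
      (fun ps i => ps.set i.toNat
        (PySem.List.pyGetD ps (i - 1) 0 + PySem.List.pyGetD nums (i - 1) 0))
      (List.replicate (nums.length + 1) 0)
    = (List.range (nums.length + 1)).map (fun j => if j ≤ m then pvPre nums j else 0) := by
  induction m with
  | zero =>
    have h0 : PySem.List.pyRange 1 (((0:Nat) : Int) + 1) = [] := by
      have := pyRangeNat 1 1
      simpa using this
    rw [h0]
    simp only [List.foldl_nil]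
    refine List.ext_getElem (by simp) ?_
    intro j h1 h2
    simp [pvPre]
    intro hj
    simp [hj, pvPre]
  | succ m ih =>
    have hm' : m ≤ nums.length := Nat.le_of_succ_le hm
    have hcast : ((m + 1 : Nat) : Int) + 1 = ((m : Int) + 1) + 1 := by push_cast; ring
    rw [hcast, PySem.List.pyRange_one_succ_right (by omega), List.foldl_append, ih hm']
    simp only [List.foldl_cons, List.foldl_nil]
    have e1 : ((m : Int) + 1) - 1 = (m : Int) := by ring
    have e2 : ((m : Int) + 1).toNat = m + 1 := by omega
    rw [e1, e2, PySem.List.pyGetD_natCast, PySem.List.pyGetD_natCast,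
      PySem.List.getD_map_range _ _ _ _ (by omega : m < nums.length + 1)]
    simp only [if_pos (Nat.le_refl m)]
    refine List.ext_getElem (by simp) ?_
    intro j h1 h2
    rw [List.getElem_set]
    simp only [List.getElem_map, List.getElem_range]
    by_cases hj : j = m + 1
    · simp [hj, pvPre_succ nums m (by omega)]
    · have h2' : j < nums.length + 1 := by simpa using h1
      by_cases hjm : j ≤ m
      · have hne : ¬ (m + 1 = j) := by omega
        simp [hne, hjm, Nat.le_succ_of_le hjm]
      · have : ¬ j ≤ m + 1 := by omega
        have hne : ¬ (m + 1 = j) := by omega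
        simp [hne, hjm, this]

lemma A_prefix_final (nums : List Int) :
    (PySem.List.pyRange 1 ((nums.length : Int) + 1)).foldl
      (fun ps i => ps.set i.toNat
        (PySem.List.pyGetD ps (i - 1) 0 + PySem.List.pyGetD nums (i - 1) 0))
      (List.replicate (nums.length + 1) 0) = pvPA nums := by
  rw [A_prefix_fold nums nums.length (Nat.le_refl _), pvPA]
  apply List.map_congr_left
  intro j hj
  simp at hj
  simp [hj]

-- the modified prefix-sum array A builds for index i
lemma A_tmp (nums : List Int) (k : Int) (i : Nat) (hi : i < nums.length) :
    (PySem.List.pyRange ((i : Int) + 1) ((nums.length : Int) + 1)).foldl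
      (fun t j => t ++ [PySem.List.pyGetD (pvPA nums) j 0 + k - PySem.List.pyGetD nums (i : Int) 0])
      (PySem.List.slice (pvPA nums) none (some ((i : Int) + 1)))
    = (List.range (i + 1)).map (pvPre nums)
      ++ (List.range' (i + 1) (nums.length - i)).map
          (fun j => pvPre nums j + k - nums.getD i 0) := by
  have hsl : PySem.List.slice (pvPA nums) none (some ((i : Int) + 1))
      = (List.range (i + 1)).map (pvPre nums) := by
    rw [PySem.List.slice_to _ (by omega : (0:Int) ≤ (i : Int) + 1)]
    have : ((i : Int) + 1).toNat = i + 1 := by omega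
    rw [this, pvPA, ← List.map_take, List.take_range, Nat.min_eq_left (by omega)]
  have hr : PySem.List.pyRange ((i : Int) + 1) ((nums.length : Int) + 1)
      = (List.range' (i + 1) (nums.length - i)).map (Nat.cast : Nat → Int) := by
    have := pyRangeNat (i + 1) (nums.length + 1)
    have e : nums.length + 1 - (i + 1) = nums.length - i := by omega
    rw [e] at this
    rw [← this]
    push_cast
    ring_nf
  rw [hsl, hr, List.foldl_map]
  rw [PySem.List.foldl_congr_mem _ _
      (fun t j => t ++ [pvPre nums j + k - nums.getD i 0]) _ ?_]
  · rw [PySem.List.foldl_append_singleton_eq_map]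
  · intro acc j hj
    have hj' : j < nums.length + 1 := by
      rcases List.mem_range'.mp hj with ⟨t, ht, rfl⟩
      omega
    rw [pvPA_get nums j hj', PySem.List.pyGetD_natCast]

lemma A_tmp_get (nums : List Int) (k : Int) (i p : Nat) (hi : i < nums.length)
    (hp : p < nums.length + 1) :
    PySem.List.pyGetD
      ((List.range (i + 1)).map (pvPre nums)
        ++ (List.range' (i + 1) (nums.length - i)).map
            (fun j => pvPre nums j + k - nums.getD i 0)) (p : Int) 0
    = if p ≤ i then pvPre nums p else pvPre nums p + k - nums.getD i 0 := by
  rw [PySem.List.pyGetD_natCast]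
  by_cases hpi : p ≤ i
  · rw [List.getD_append _ _ _ _ (by simp; omega), PySem.List.getD_map_range _ _ _ _ (by omega)]
    simp [hpi]
  · rw [List.getD_append_right _ _ _ _ (by simp; omega)]
    simp only [List.length_map, List.length_range]
    have hlt : p - (i + 1) < nums.length - i := by omega
    rw [List.range'_eq_map_range, List.map_map, PySem.List.getD_map_range _ _ _ _ hlt]
    simp only [Function.comp]
    have : i + 1 + (p - (i + 1)) = p := by omega
    rw [this]
    simp [hpi]

lemma A_tmp_last (nums : List Int) (k : Int) (i : Nat) (hi : i < nums.length) :
    PySem.List.pyGetD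
      ((List.range (i + 1)).map (pvPre nums)
        ++ (List.range' (i + 1) (nums.length - i)).map
            (fun j => pvPre nums j + k - nums.getD i 0)) (-1) 0
    = nums.sum + k - nums.getD i 0 := by
  have hlen : ((List.range (i + 1)).map (pvPre nums)
      ++ (List.range' (i + 1) (nums.length - i)).map
          (fun j => pvPre nums j + k - nums.getD i 0)).length = nums.length + 1 := by
    simp; omega
  rw [pvGetD_neg_one _ _ (by intro h; rw [h] at hlen; simp at hlen), hlen]
  have := A_tmp_get nums k i nums.length hi (by omega)
  rw [PySem.List.pyGetD_natCast] at this
  simp only [Nat.add_sub_cancel]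
  rw [this, if_neg (by omega), pvPre_length]

lemma pyRangeOneNat (b : Nat) :
    PySem.List.pyRange 1 (b : Int) = (List.range' 1 (b - 1)).map (Nat.cast : Nat → Int) := by
  have := pyRangeNat 1 b
  simpa using this

lemma A_cur (nums : List Int) (k : Int) (i : Nat) (hi : i < nums.length) :
    (PySem.List.pyRange 1 (nums.length : Int)).foldl
      (fun c p => if 2 * PySem.List.pyGetD
            ((List.range (i + 1)).map (pvPre nums)
              ++ (List.range' (i + 1) (nums.length - i)).map
                  (fun j => pvPre nums j + k - nums.getD i 0)) p 0
          = PySem.List.pyGetD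
            ((List.range (i + 1)).map (pvPre nums)
              ++ (List.range' (i + 1) (nums.length - i)).map
                  (fun j => pvPre nums j + k - nums.getD i 0)) (-1) 0
          then c + 1 else c) 0
    = pvCand nums k i := by
  rw [pyRangeOneNat nums.length, List.foldl_map]
  rw [PySem.List.foldl_congr_mem _ _
      (fun c p => if (if p ≤ i then 2 * pvPre nums p = nums.sum + (k - nums.getD i 0)
          else 2 * pvPre nums p = nums.sum - (k - nums.getD i 0)) then c + 1 else c) _ ?_]
  · rw [pvFoldCount]
    have hsplit : List.range' 1 (nums.length - 1)
        = List.range' 1 i ++ List.range' (1 + i) (nums.length - 1 - i) := by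
      have e : nums.length - 1 = i + (nums.length - 1 - i) := by omega
      rw [e, ← List.range'_append (s := 1) (m := i) (n := nums.length - 1 - i) (step := 1)]
      norm_num
    rw [hsplit, List.countP_append]
    have c1 : (List.range' 1 i).countP
        (fun p => decide (if p ≤ i then 2 * pvPre nums p = nums.sum + (k - nums.getD i 0)
          else 2 * pvPre nums p = nums.sum - (k - nums.getD i 0)))
        = (List.range' 1 i).countP (fun p => decide (2 * pvPre nums p = nums.sum + (k - nums.getD i 0))) := by
      apply List.countP_congr
      intro p hp
      rcases List.mem_range'.mp hp with ⟨t, ht, rfl⟩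
      simp only [decide_eq_true_eq]
      rw [if_pos (by omega)]
    have c2 : (List.range' (1 + i) (nums.length - 1 - i)).countP
        (fun p => decide (if p ≤ i then 2 * pvPre nums p = nums.sum + (k - nums.getD i 0)
          else 2 * pvPre nums p = nums.sum - (k - nums.getD i 0)))
        = (List.range' (1 + i) (nums.length - 1 - i)).countP
            (fun p => decide (2 * pvPre nums p = nums.sum - (k - nums.getD i 0))) := by
      apply List.countP_congr
      intro p hp
      rcases List.mem_range'.mp hp with ⟨t, ht, rfl⟩
      simp only [decide_eq_true_eq]
      rw [if_neg (by omega)]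
    rw [c1, c2, pvCand, pvCnt, pvCnt]
    have : 1 + i = i + 1 := by omega
    rw [this]
    push_cast
    ring
  · intro acc p hp
    rcases List.mem_range'.mp hp with ⟨t, ht, hpe⟩
    have hp1 : p < nums.length + 1 := by omega
    rw [A_tmp_get nums k i p hi hp1, A_tmp_last nums k i hi]
    by_cases hpi : p ≤ i
    · simp only [if_pos hpi]
      by_cases h : 2 * pvPre nums p = nums.sum + (k - nums.getD i 0)
      · rw [if_pos (by omega), if_pos h]
      · rw [if_neg (by omega), if_neg h]
    · simp only [if_neg hpi]
      by_cases h : 2 * pvPre nums p = nums.sum - (k - nums.getD i 0)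
      · rw [if_pos (by omega), if_pos h]
      · rw [if_neg (by omega), if_neg h]

lemma A_base (nums : List Int) :
    (PySem.List.pyRange 1 (nums.length : Int)).foldl
      (fun r i => if 2 * PySem.List.pyGetD (pvPA nums) i 0
          = PySem.List.pyGetD (pvPA nums) (nums.length : Int) 0 then r + 1 else r) 0
    = pvCnt nums 1 (nums.length - 1) nums.sum := by
  rw [pyRangeOneNat nums.length, List.foldl_map]
  rw [PySem.List.foldl_congr_mem _ _
      (fun r p => if 2 * pvPre nums p = nums.sum then r + 1 else r) _ ?_]
  · rw [pvFoldCount, pvCnt]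
    simp
  · intro acc p hp
    rcases List.mem_range'.mp hp with ⟨t, ht, rfl⟩
    rw [pvPA_get nums _ (by omega), pvPA_get nums nums.length (by omega), pvPre_length]

lemma A_eq_spec (nums : List Int) (k : Int) : waysToPartition nums k = pvSpec nums k := by
  simp only [waysToPartition]
  rw [A_prefix_final, A_base, PySem.List.pyRange_zero_natCast, List.foldl_map]
  rw [PySem.List.foldl_congr_mem _ _ (fun r i => max r (pvCand nums k i)) _ ?_]
  · rfl
  · intro acc i hi
    have hi' : i < nums.length := List.mem_range.mp hi
    rw [A_tmp nums k i hi', A_cur nums k i hi']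

lemma B_scan (xs : List Int) (acc : List Int) (s : Int) :
    xs.foldl (fun (st : List Int × Int) x => (st.1 ++ [st.2 + x], st.2 + x)) (acc, s)
    = (acc ++ (List.range xs.length).map (fun j => s + (xs.take (j + 1)).sum), s + xs.sum) := by
  induction xs generalizing acc s with
  | nil => simp
  | cons x xs ih =>
    simp only [List.foldl_cons, ih]
    refine Prod.ext ?_ ?_
    · simp only [List.length_cons, List.range_succ_eq_map, List.map_cons, List.map_map]
      simp [List.append_assoc, Function.comp, add_assoc]
    · simp [add_assoc]

def pvBP (nums : List Int) : List Int := (List.range nums.length).map (fun j => pvPre nums (j + 1))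

lemma B_scan_final (nums : List Int) :
    nums.foldl (fun (st : List Int × Int) x => (st.1 ++ [st.2 + x], st.2 + x)) ([], 0)
    = (pvBP nums, nums.sum) := by
  rw [B_scan]
  simp [pvBP, pvPre]

lemma pvBP_get (nums : List Int) (p : Nat) (h1 : 1 ≤ p) (h2 : p ≤ nums.length) :
    PySem.List.pyGetD (pvBP nums) ((p : Int) - 1) 0 = pvPre nums p := by
  have e : ((p : Int) - 1) = ((p - 1 : Nat) : Int) := by omega
  rw [e, PySem.List.pyGetD_natCast, pvBP, PySem.List.getD_map_range _ _ _ _ (by omega)]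
  congr 1
  omega

lemma B_right0 (nums : List Int) (v : Int) :
    ((PySem.List.pyRange 1 (nums.length : Int)).foldl
      (fun (d : PySem.Dict Int Int) p =>
        let key := 2 * PySem.List.pyGetD (pvBP nums) (p - 1) 0
        d.insert key (d.getD key 0 + 1)) PySem.Dict.empty).getD v 0
    = pvCnt nums 1 (nums.length - 1) v := by
  rw [pyRangeOneNat nums.length, List.foldl_map]
  rw [PySem.List.foldl_congr_mem _ _
      (fun (d : PySem.Dict Int Int) (p : Nat) =>
        d.insert (2 * pvPre nums p) (d.getD (2 * pvPre nums p) 0 + 1)) _ ?_]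
  · have hmap := List.foldl_map (f := fun p : Nat => 2 * pvPre nums p)
        (g := fun (d : PySem.Dict Int Int) (x : Int) => d.insert x (d.getD x 0 + 1))
        (l := List.range' 1 (nums.length - 1)) (init := PySem.Dict.empty)
    rw [← hmap, PySem.Dict.getD_foldl_insert_add_one]
    rw [PySem.Dict.getD_empty, List.count_eq_countP, List.countP_map]
    rw [pvCnt, zero_add]
    congr 1
  · intro acc p hp
    rcases List.mem_range'.mp hp with ⟨t, ht, rfl⟩
    rw [pvBP_get nums _ (by omega) (by omega)]

def pvBStep (nums : List Int) (k : Int)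
    (st : PySem.Dict Int Int × PySem.Dict Int Int × Int) (i : Nat) :
    PySem.Dict Int Int × PySem.Dict Int Int × Int :=
  let lr := if 1 ≤ i then
      (st.1.insert (2 * pvPre nums i) (st.1.getD (2 * pvPre nums i) 0 + 1),
       st.2.1.insert (2 * pvPre nums i) (st.2.1.getD (2 * pvPre nums i) 0 - 1))
    else (st.1, st.2.1)
  let d := k - nums.getD i 0
  let cand := lr.1.getD (nums.sum + d) 0 + lr.2.getD (nums.sum - d) 0
  (lr.1, lr.2, if cand > st.2.2 then cand else st.2.2)

lemma pvIfMax (r c : Int) : (if c > r then c else r) = max r c := by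
  rw [max_def]
  split_ifs <;> omega

lemma B_loop (nums : List Int) (k : Int) :
    ∀ (t m : Nat), m ≤ nums.length → nums.length - m = t →
    ∀ (L R : PySem.Dict Int Int) (r : Int),
    (∀ v, L.getD v 0 = pvCnt nums 1 (m - 1) v) →
    (∀ v, R.getD v 0 = pvCnt nums (max m 1) (nums.length - max m 1) v) →
    ((List.range' m t).foldl (pvBStep nums k) (L, R, r)).2.2
      = (List.range' m t).foldl (fun r i => max r (pvCand nums k i)) r := by
  intro t
  induction t with
  | zero => intro m _ _ L R r _ _; simp
  | succ t ih =>
    intro m hm ht L R r hL hR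
    rw [List.range'_succ, List.foldl_cons, List.foldl_cons]
    by_cases hm1 : 1 ≤ m
    · have hmax : max m 1 = m := by omega
      have hstep : pvBStep nums k (L, R, r) m
          = (L.insert (2 * pvPre nums m) (L.getD (2 * pvPre nums m) 0 + 1),
             R.insert (2 * pvPre nums m) (R.getD (2 * pvPre nums m) 0 - 1),
             max r (pvCand nums k m)) := by
        simp only [pvBStep, if_pos hm1]
        have hLm : ∀ v, (L.insert (2 * pvPre nums m) (L.getD (2 * pvPre nums m) 0 + 1)).getD v 0
            = pvCnt nums 1 m v := by
          intro v
          rw [PySem.Dict.getD_insert]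
          have e : m = (m - 1) + 1 := by omega
          rw [e, pvCnt_concat, ← e]
          have e2 : 1 + (m - 1) = m := by omega
          rw [e2]
          by_cases hv : v = 2 * pvPre nums m
          · rw [if_pos hv, hL, hv, if_pos rfl]
          · rw [if_neg hv, hL, if_neg (fun h => hv h.symm), add_zero]
        have hRm : ∀ v, (R.insert (2 * pvPre nums m) (R.getD (2 * pvPre nums m) 0 - 1)).getD v 0
            = pvCnt nums (m + 1) (nums.length - (m + 1)) v := by
          intro v
          rw [PySem.Dict.getD_insert]
          have e : nums.length - m = (nums.length - (m + 1)) + 1 := by omega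
          by_cases hv : v = 2 * pvPre nums m
          · rw [if_pos hv, hR, hmax, e, pvCnt_cons, hv, if_pos rfl]
            ring
          · rw [if_neg hv, hR, hmax, e, pvCnt_cons, if_neg (fun h => hv h.symm)]
            ring
        rw [hLm, hRm]
        have e3 : pvCnt nums 1 m (nums.sum + (k - nums.getD m 0))
            + pvCnt nums (m + 1) (nums.length - (m + 1)) (nums.sum - (k - nums.getD m 0))
            = pvCand nums k m := by
          rw [pvCand]
          have e4 : nums.length - (m + 1) = nums.length - 1 - m := by omega
          rw [e4]
        rw [e3, pvIfMax]
      rw [hstep, ih (m + 1) (by omega) (by omega) _ _ _ ?_ ?_]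
      · intro v
        rw [PySem.Dict.getD_insert]
        have e : m = (m - 1) + 1 := by omega
        rw [show m + 1 - 1 = m from by omega, e, pvCnt_concat, ← e]
        have e2 : 1 + (m - 1) = m := by omega
        rw [e2]
        by_cases hv : v = 2 * pvPre nums m
        · rw [if_pos hv, hL, hv, if_pos rfl]
        · rw [if_neg hv, hL, if_neg (fun h => hv h.symm), add_zero]
      · intro v
        rw [PySem.Dict.getD_insert]
        have hmax2 : max (m + 1) 1 = m + 1 := by omega
        rw [hmax2]
        have e : nums.length - m = (nums.length - (m + 1)) + 1 := by omega
        by_cases hv : v = 2 * pvPre nums m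
        · rw [if_pos hv, hR, hmax, e, pvCnt_cons, hv, if_pos rfl]
          ring
        · rw [if_neg hv, hR, hmax, e, pvCnt_cons, if_neg (fun h => hv h.symm)]
          ring
    · have hm0 : m = 0 := by omega
      subst hm0
      have hstep : pvBStep nums k (L, R, r) 0
          = (L, R, max r (pvCand nums k 0)) := by
        simp only [pvBStep, if_neg (by omega : ¬ (1 ≤ 0))]
        rw [hL, hR]
        have e3 : pvCnt nums 1 (0 - 1) (nums.sum + (k - nums.getD 0 0))
            + pvCnt nums (max 0 1) (nums.length - max 0 1) (nums.sum - (k - nums.getD 0 0))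
            = pvCand nums k 0 := by
          rw [pvCand]
          norm_num
        rw [e3, pvIfMax]
      rw [hstep, ih 1 (by omega) (by omega) _ _ _ (by simpa using hL) (by simpa using hR)]

lemma B_eq_spec (nums : List Int) (k : Int) : waysToPartition_alt nums k = pvSpec nums k := by
  simp only [waysToPartition_alt, B_scan_final]
  rw [B_right0, PySem.List.pyRange_zero_natCast, List.foldl_map]
  rw [PySem.List.foldl_congr_mem _ _ (pvBStep nums k) _ ?_]
  · rw [List.range_eq_range',
      B_loop nums k nums.length 0 (by omega) (by omega) _ _ _ ?_ ?_, pvSpec, List.range_eq_range']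
    · intro v
      rw [PySem.Dict.getD_empty, pvCnt_zero]
    · intro v
      rw [B_right0]
      simp
  · intro st i hi
    have hi' : i < nums.length := List.mem_range.mp hi
    simp only [pvBStep]
    by_cases h1 : 1 ≤ i
    · have hc : (1 : Int) ≤ (i : Int) := by exact_mod_cast h1
      simp only [if_pos h1, if_pos hc, pvBP_get nums i h1 (by omega),
        PySem.List.pyGetD_natCast]
    · have hc : ¬ ((1 : Int) ≤ (i : Int)) := by exact_mod_cast h1
      simp only [if_neg h1, if_neg hc, PySem.List.pyGetD_natCast]

-- ===== VERDICT (by name: the statement is the Claim_ definition above) =====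
theorem waysToPartition_spec : Claim_equal_waysToPartition := by
  intro nums k _
  unfold Spec_waysToPartition
  rw [A_eq_spec, B_eq_spec]
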